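-- pv_equiv track=rewrite | github.com/bizyumov/yandex-office | common/oauth_apps.py | classify_access
-- ===== SOURCE A (Python) =====
-- def classify_access(scopes: list[str]) -> str:
--     normalized = [str(scope).strip().lower() for scope in scopes if str(scope).strip()]
--     if not normalized:
--         return "custom"
--     if any(scope.endswith(":all") for scope in normalized):
--         return "full access"
--
--     write_markers = ("write", "delete", "update", "create", "manage", "full")
--     if any(any(marker in scope for marker in write_markers) for scope in normalized):
--         return "write-capable"
--     return "read-only"
-- ===== SOURCE B (Python) =====
-- LEVELS = ("read-only", "write-capable", "full access")
-- WRITE_MARKERS = ("write", "delete", "update", "create", "manage", "full")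
--
--
-- def _rank(scope):
--     # strength of a single normalized scope on the access lattice 0 < 1 < 2
--     if scope.endswith(":all"):
--         return 2
--     if any(m in scope for m in WRITE_MARKERS):
--         return 1
--     return 0
--
--
-- def classify_access(scopes: list[str]) -> str:
--     # classify each scope independently, combine with max over the lattice;
--     # -1 = "no non-empty scope seen"; stop early once the top (2) is reached
--     best = -1
--     for raw in scopes:
--         scope = str(raw).strip().lower()
--         if scope:
--             best = max(best, _rank(scope))
--             if best == 2:
--                 break
--     return "custom" if best < 0 else LEVELS[best]
-- ===== Notes on version B (the rewrite author's own statement) =====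
-- stated objective: alternative
-- what changed: Instead of building a normalized list and running staged whole-list any() tests per label, B classifies each scope independently to a numeric rank on the access lattice (0=read-only,1=write-capable,2=full), folds a running max with early termination at the top, and picks the label from a table.
import Mathlib
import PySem

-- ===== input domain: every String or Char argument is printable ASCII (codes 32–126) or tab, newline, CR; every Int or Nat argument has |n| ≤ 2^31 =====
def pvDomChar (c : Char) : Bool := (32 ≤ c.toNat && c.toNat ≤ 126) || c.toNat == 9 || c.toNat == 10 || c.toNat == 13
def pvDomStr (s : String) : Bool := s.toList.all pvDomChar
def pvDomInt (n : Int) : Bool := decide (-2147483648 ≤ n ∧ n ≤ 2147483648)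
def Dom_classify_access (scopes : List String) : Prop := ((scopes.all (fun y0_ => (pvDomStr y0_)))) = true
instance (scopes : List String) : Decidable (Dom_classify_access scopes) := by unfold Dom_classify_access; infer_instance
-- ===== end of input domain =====

-- B replaces A's staged whole-list any() tests with a per-scope rank on the access lattice 0<1<2, a running max with early break, and a label table (alternative decomposition, same cost).


-- ===== PORT A =====
def classify_access (scopes : List String) : String :=
  let normalized := (scopes.filter (fun s => !(PySem.Str.strip s == ""))).map
      (fun s => PySem.Str.lower (PySem.Str.strip s))
  if normalized = [] then "custom"
  else if normalized.any (fun s => PySem.Str.endswith s ":all") then "full access"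
  else if normalized.any (fun s =>
      (["write", "delete", "update", "create", "manage", "full"] : List String).any
        (fun m => PySem.Str.isIn m s)) then "write-capable"
  else "read-only"

-- ===== PORT B =====
def pvLevels : List String := ["read-only", "write-capable", "full access"]
def pvWriteMarkers : List String := ["write", "delete", "update", "create", "manage", "full"]

-- strength of a single normalized scope on the access lattice 0 < 1 < 2
def pvRank (scope : String) : Int :=
  if PySem.Str.endswith scope ":all" then 2
  else if pvWriteMarkers.any (fun m => PySem.Str.isIn m scope) then 1
  else 0

-- the `for raw in scopes:` loop of B, with its `break` once best = 2
def pvLoop : List String → Int → Int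
  | [], best => best
  | raw :: rest, best =>
      let scope := PySem.Str.lower (PySem.Str.strip raw)
      if scope == "" then pvLoop rest best
      else
        let best' := max best (pvRank scope)
        if best' == 2 then best' else pvLoop rest best'

def classify_access_alt (scopes : List String) : String :=
  let best := pvLoop scopes (-1)
  if best < 0 then "custom"
  else (PySem.List.pyGet? pvLevels best).getD ""  -- the index is provably in range whenever this branch is reached

-- ===== PRECONDITION & SPEC =====
def Spec_classify_access (scopes : List String) (out : String) : Prop := out = classify_access_alt scopes
instance (scopes : List String) (out : String) : Decidable (Spec_classify_access scopes out) := by unfold Spec_classify_access; infer_instance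

-- ===== CLAIM (what is proved, stated in full; the proofs are below) =====
def Claim_equal_classify_access : Prop := ∀ (scopes : List String), Dom_classify_access scopes → Spec_classify_access scopes (classify_access scopes)

-- ===== LEMMAS AND PROOFS =====

-- A's normalized list and its two any() tests, named for the proofs
def pvNorm (l : List String) : List String :=
  (l.filter (fun s => !(PySem.Str.strip s == ""))).map (fun s => PySem.Str.lower (PySem.Str.strip s))
def pvAnyAll (l : List String) : Bool := l.any (fun s => PySem.Str.endswith s ":all")
def pvAnyW (l : List String) : Bool := l.any (fun s => pvWriteMarkers.any (fun m => PySem.Str.isIn m s))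

-- zeta-reduced equation lemmas for the let-bearing definitions
theorem classify_access_def (l : List String) :
    classify_access l =
      (if pvNorm l = [] then "custom"
       else if pvAnyAll (pvNorm l) then "full access"
       else if pvAnyW (pvNorm l) then "write-capable"
       else "read-only") := rfl

theorem classify_access_alt_def (l : List String) :
    classify_access_alt l =
      (if pvLoop l (-1) < 0 then "custom"
       else (PySem.List.pyGet? pvLevels (pvLoop l (-1))).getD "") := rfl

theorem pvLoop_cons (raw : String) (rest : List String) (best : Int) :
    pvLoop (raw :: rest) best =
      (if PySem.Str.lower (PySem.Str.strip raw) == "" then pvLoop rest best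
       else if max best (pvRank (PySem.Str.lower (PySem.Str.strip raw))) == 2 then
         max best (pvRank (PySem.Str.lower (PySem.Str.strip raw)))
       else pvLoop rest (max best (pvRank (PySem.Str.lower (PySem.Str.strip raw))))) := rfl

-- max of the ranks of the non-empty normalized scopes, -1 if there are none
def pvMaxRank : List String → Int
  | [] => -1
  | raw :: rest =>
      if PySem.Str.lower (PySem.Str.strip raw) == "" then pvMaxRank rest
      else max (pvRank (PySem.Str.lower (PySem.Str.strip raw))) (pvMaxRank rest)

theorem pvRank_bounds (s : String) : 0 ≤ pvRank s ∧ pvRank s ≤ 2 := by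
  unfold pvRank; split_ifs <;> omega

theorem pvMaxRank_bounds (l : List String) : -1 ≤ pvMaxRank l ∧ pvMaxRank l ≤ 2 := by
  induction l with
  | nil => simp [pvMaxRank]
  | cons raw rest ih =>
      have h := pvRank_bounds (PySem.Str.lower (PySem.Str.strip raw))
      unfold pvMaxRank; split_ifs <;> omega

-- the early-`break` loop computes max best (pvMaxRank l)
theorem pvLoop_eq (l : List String) : ∀ best : Int, -1 ≤ best → best ≤ 2 →
    pvLoop l best = max best (pvMaxRank l) := by
  induction l with
  | nil => intro best h1 h2; unfold pvLoop pvMaxRank; omega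
  | cons raw rest ih =>
      intro best h1 h2
      rw [pvLoop_cons]
      unfold pvMaxRank
      have hr := pvRank_bounds (PySem.Str.lower (PySem.Str.strip raw))
      have hm := pvMaxRank_bounds rest
      simp only [beq_iff_eq]
      split_ifs with hs h2'
      · exact ih best h1 h2
      · omega
      · rw [ih _ (by omega) (by omega)]; omega

theorem lower_eq_empty (t : String) : (PySem.Str.lower t == "") = (t == "") := by
  by_cases ht : t = ""
  · simp [ht, PySem.Str.lower, PySem.Chars.lower]
  · have h2 : ¬ PySem.Str.lower t = "" := by
      intro h
      have := congrArg String.toList h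
      simp [PySem.Chars.lower] at this
      exact ht this
    simp [ht, h2]

theorem pv_combine (e w A B : Bool) (E E' : Prop) [Decidable E] [Decidable E'] (h : ¬ E') :
    max (if e then (2:Int) else if w then 1 else 0)
      (if A then 2 else if B then 1 else if E then -1 else 0)
  = (if (e || A) then 2 else if (w || B) then 1 else if E' then -1 else 0) := by
  cases e <;> cases w <;> cases A <;> cases B <;> split_ifs <;> simp_all

-- pvMaxRank in terms of A's staged any() tests over the normalized list
theorem pvMaxRank_char (l : List String) :
    pvMaxRank l =
      (if pvAnyAll (pvNorm l) then 2
       else if pvAnyW (pvNorm l) then 1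
       else if pvNorm l = [] then -1 else 0) := by
  induction l with
  | nil => simp [pvMaxRank, pvNorm, pvAnyAll, pvAnyW]
  | cons raw rest ih =>
      by_cases hs : (PySem.Str.strip raw == "") = true
      · have hn : pvNorm (raw :: rest) = pvNorm rest := by
          simp [pvNorm, List.filter_cons, hs]
        have h2 : (PySem.Str.lower (PySem.Str.strip raw) == "") = true := by
          rw [lower_eq_empty]; exact hs
        unfold pvMaxRank
        rw [if_pos h2, hn]
        exact ih
      · have hn : pvNorm (raw :: rest) =
            PySem.Str.lower (PySem.Str.strip raw) :: pvNorm rest := by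
          simp only [pvNorm, List.filter_cons]
          simp [hs]
        have h2 : ¬ (PySem.Str.lower (PySem.Str.strip raw) == "") = true := by
          rw [lower_eq_empty]; exact hs
        unfold pvMaxRank
        rw [if_neg h2, ih, hn]
        simp only [pvAnyAll, pvAnyW, List.any_cons]
        unfold pvRank
        exact pv_combine _ _ _ _ _ _ (by simp)

-- ===== VERDICT (by name: the statement is the Claim_ definition above) =====
theorem classify_access_spec : Claim_equal_classify_access := by
  intro scopes _
  unfold Spec_classify_access
  rw [classify_access_def, classify_access_alt_def,
      pvLoop_eq scopes (-1) (by omega) (by omega),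
      max_eq_right (pvMaxRank_bounds scopes).1, pvMaxRank_char]
  by_cases h0 : pvNorm scopes = []
  · simp [h0, pvAnyAll, pvAnyW]
  · rw [if_neg h0]
    by_cases hA : pvAnyAll (pvNorm scopes) = true
    · rw [if_pos hA, if_pos hA]
      decide
    · rw [if_neg hA, if_neg hA]
      by_cases hW : pvAnyW (pvNorm scopes) = true
      · rw [if_pos hW, if_pos hW]
        decide
      · rw [if_neg hW, if_neg hW, if_neg h0]
        decide
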